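-- pv_equiv track=rewrite | github.com/sdpython/onnx-diagnostic | onnx_diagnostic/torch_models/validate.py | _preprocess_model_id
-- ===== SOURCE A (Python) =====
-- from typing import Any, Callable, Dict, List, Optional, Sequence, Tuple, Union
--
-- def _preprocess_model_id(
--     model_id: str, subfolder: Optional[str], same_as_pretrained: bool, use_pretrained: bool
-- ) -> Tuple[str, Optional[str], bool, bool]:
--     if subfolder or "//" not in model_id:
--         return model_id, subfolder, same_as_pretrained, use_pretrained
--     spl = model_id.split("//")
--     if spl[-1] == "pretrained":
--         return _preprocess_model_id("//".join(spl[:-1]), "", True, True)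
--     if spl[-1] in {"transformer", "vae"}:
--         # known subfolder
--         return "//".join(spl[:-1]), spl[-1], same_as_pretrained, use_pretrained
--     return model_id, subfolder, same_as_pretrained, use_pretrained
-- ===== SOURCE B (Python) =====
-- # B: split once, strip trailing "pretrained" pieces by index arithmetic (no re-split/re-join per step),
-- # then emit the result with a single join.  Alternative decomposition of A's tail recursion.
-- def _preprocess_model_id(model_id, subfolder, same_as_pretrained, use_pretrained):
--     if subfolder or "//" not in model_id:
--         return model_id, subfolder, same_as_pretrained, use_pretrained
--     spl = model_id.split("//")
--     k = len(spl)
--     while k > 1 and spl[k - 1] == "pretrained":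
--         k -= 1
--     if k == len(spl):
--         if spl[-1] in ("transformer", "vae"):
--             return "//".join(spl[:-1]), spl[-1], same_as_pretrained, use_pretrained
--         return model_id, subfolder, same_as_pretrained, use_pretrained
--     if k > 1 and spl[k - 1] in ("transformer", "vae"):
--         return "//".join(spl[:k - 1]), spl[k - 1], True, True
--     return "//".join(spl[:k]), "", True, True
-- ===== Notes on version B (the rewrite author's own statement) =====
-- stated objective: alternative
-- what changed: A recursively re-splits and re-joins the string once per trailing '//pretrained' segment; B splits once, strips trailing 'pretrained' pieces with an index loop over the split list, and joins at most once.
import Mathlib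
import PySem

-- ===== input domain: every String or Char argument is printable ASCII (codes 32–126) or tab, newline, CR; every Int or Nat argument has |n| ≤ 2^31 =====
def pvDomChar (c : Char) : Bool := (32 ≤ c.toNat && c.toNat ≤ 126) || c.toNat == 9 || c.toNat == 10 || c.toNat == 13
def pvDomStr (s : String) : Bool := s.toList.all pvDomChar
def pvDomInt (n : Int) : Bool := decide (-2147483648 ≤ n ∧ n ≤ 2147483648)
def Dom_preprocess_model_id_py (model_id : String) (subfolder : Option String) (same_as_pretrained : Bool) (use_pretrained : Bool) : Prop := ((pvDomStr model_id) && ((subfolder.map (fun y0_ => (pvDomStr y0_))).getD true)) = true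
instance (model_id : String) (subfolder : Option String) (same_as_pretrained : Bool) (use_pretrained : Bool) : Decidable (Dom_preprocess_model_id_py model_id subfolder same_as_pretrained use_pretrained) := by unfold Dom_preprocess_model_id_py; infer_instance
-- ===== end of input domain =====

-- One honest line: B replaces A's per-step re-split/re-join recursion by a single split, an index
-- loop stripping trailing "pretrained" pieces, and at most one join (alternative decomposition).

-- ===== PORT A =====
-- Helpers needed by port A's termination proof (cited in decreasing_by): a structural model of
-- Python's str.split("//") and the fact that dropping the last piece shortens the string.

-- first-piece cons: prepend p to the head piece of a non-empty piece list
def pvConsHead (p : List Char) : List (List Char) → List (List Char)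
  | [] => [p]
  | x :: t => (p ++ x) :: t

-- greedy left-to-right split on "//" (structural model of PySem.Chars.splitOn · ['/','/'])
def pvSplit0 : List Char → List (List Char)
  | '/' :: '/' :: rest => [] :: pvSplit0 rest
  | c :: rest => pvConsHead [c] (pvSplit0 rest)
  | [] => [[]]

theorem pvSplit0_ne_nil (l : List Char) : pvSplit0 l ≠ [] := by
  rw [pvSplit0.eq_def]
  split
  · simp
  · cases h : pvSplit0 _ <;> simp [pvConsHead]
  · simp

theorem pvConsHead_consHead (p q : List Char) (xs : List (List Char)) :
    pvConsHead p (pvConsHead q xs) = pvConsHead (p ++ q) xs := by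
  cases xs <;> simp [pvConsHead]

theorem pvConsHead_nil (xs : List (List Char)) (h : xs ≠ []) : pvConsHead [] xs = xs := by
  cases xs with
  | nil => exact absurd rfl h
  | cons a t => simp [pvConsHead]

theorem pvSplit0_cons (c : Char) (rest : List Char)
    (h : ¬ (['/','/'] : List Char).isPrefixOf (c :: rest)) :
    pvSplit0 (c :: rest) = pvConsHead [c] (pvSplit0 rest) := by
  rw [pvSplit0.eq_def]
  split
  · rename_i heq
    exfalso
    apply h
    injection heq with h1 h2
    subst h1; subst h2
    simp [List.isPrefixOf]
  · rename_i heq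
    injection heq with h1 h2
    subst h1; subst h2
    rfl
  · rename_i heq
    cases heq

theorem pvGo_spec (fuel : Nat) : ∀ (l cur : List Char) (acc : List (List Char)), l.length < fuel →
    PySem.Chars.splitOn.go ['/','/'] fuel l cur acc
      = acc.reverse ++ pvConsHead cur.reverse (pvSplit0 l) := by
  induction fuel with
  | zero => intro l cur acc h; omega
  | succ f ih =>
    intro l cur acc h
    match l with
    | [] =>
      rw [PySem.Chars.splitOn.go]
      · simp [pvSplit0, pvConsHead]
      · omega
    | c :: rest =>
      rw [PySem.Chars.splitOn.go]
      by_cases hp : (['/','/'] : List Char).isPrefixOf (c :: rest)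
      · obtain ⟨t, ht⟩ : ∃ t, c :: rest = '/' :: '/' :: t := by
          obtain ⟨t, ht⟩ := List.isPrefixOf_iff_prefix.mp hp
          exact ⟨t, by simpa using ht.symm⟩
        simp only [hp, if_true]
        rw [ih _ _ _ (by simp at h ⊢; omega)]
        have h2 : List.drop (['/','/'] : List Char).length (c :: rest) = t := by rw [ht]; rfl
        have h3 : pvSplit0 (c :: rest) = [] :: pvSplit0 t := by rw [ht, pvSplit0]
        rw [h2, h3]
        cases hs : pvSplit0 t with
        | nil => exact absurd hs (pvSplit0_ne_nil _)
        | cons a t' => simp [pvConsHead]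
      · simp only [hp, if_false, Bool.false_eq_true]
        rw [ih _ _ _ (by simp at h ⊢; omega)]
        rw [pvSplit0_cons _ _ hp, pvConsHead_consHead]
        simp

theorem pvSplitOn_eq (l : List Char) : PySem.Chars.splitOn l ['/','/'] = pvSplit0 l := by
  rw [PySem.Chars.splitOn, pvGo_spec _ _ _ _ (by omega)]
  simp [pvConsHead_nil _ (pvSplit0_ne_nil l)]

-- intercalate "//" over piece lists
theorem pvInter_cons (p q : List Char) (ys : List (List Char)) :
    (['/','/'] : List Char).intercalate (p :: q :: ys)
      = p ++ '/' :: '/' :: (['/','/'] : List Char).intercalate (q :: ys) := by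
  simp [List.intercalate, List.intersperse]

theorem pvInter_consHead (c : Char) (x : List Char) (ys : List (List Char)) :
    (['/','/'] : List Char).intercalate ((c :: x) :: ys)
      = c :: (['/','/'] : List Char).intercalate (x :: ys) := by
  cases ys with
  | nil => simp [List.intercalate]
  | cons y t => rw [pvInter_cons, pvInter_cons]; simp

-- str.split/str.join round-trip: joining the pieces gives the string back
theorem pvInter_split0 (l : List Char) :
    (['/','/'] : List Char).intercalate (pvSplit0 l) = l := by
  induction l using pvSplit0.induct with
  | case1 rest ih =>
    rw [pvSplit0]
    cases hs : pvSplit0 rest with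
    | nil => exact absurd hs (pvSplit0_ne_nil _)
    | cons a t =>
      rw [hs] at ih
      rw [pvInter_cons]
      simpa using ih
  | case2 c rest h1 ih =>
    rw [pvSplit0_cons c rest (by
      intro hpf
      obtain ⟨t, ht⟩ := List.isPrefixOf_iff_prefix.mp hpf
      have hct : c = '/' ∧ rest = '/' :: t := by simpa using ht.symm
      exact h1 t hct.1 hct.2)]
    cases hs : pvSplit0 rest with
    | nil => exact absurd hs (pvSplit0_ne_nil _)
    | cons a t =>
      rw [hs] at ih
      simp only [pvConsHead, List.singleton_append]
      rw [pvInter_consHead, ih]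
  | case3 => simp [pvSplit0, List.intercalate]

theorem pvConsHead_length (p : List Char) (xs : List (List Char)) (h : xs ≠ []) :
    (pvConsHead p xs).length = xs.length := by
  cases xs with
  | nil => exact absurd rfl h
  | cons a t => simp [pvConsHead]

-- "//" occurs in l  ↔  the split has at least two pieces
theorem pvLen2_iff (l : List Char) :
    PySem.Chars.isIn ['/','/'] l = true ↔ 2 ≤ (pvSplit0 l).length := by
  induction l using pvSplit0.induct with
  | case1 rest ih =>
    constructor
    · intro _
      rw [pvSplit0]
      have := pvSplit0_ne_nil rest
      cases hs : pvSplit0 rest with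
      | nil => exact absurd hs this
      | cons a t => simp
    · intro _
      rw [PySem.Chars.isIn_iff_infix]
      exact List.infix_iff_prefix_suffix.mpr ⟨'/' :: '/' :: rest, ⟨rest, rfl⟩, ⟨[], by simp⟩⟩
  | case2 c rest h1 ih =>
    have hnp : ¬ (['/','/'] : List Char).isPrefixOf (c :: rest) := by
      intro hpf
      obtain ⟨t, ht⟩ := List.isPrefixOf_iff_prefix.mp hpf
      have hct : c = '/' ∧ rest = '/' :: t := by simpa using ht.symm
      exact h1 t hct.1 hct.2
    rw [pvSplit0_cons c rest hnp,
        pvConsHead_length _ _ (pvSplit0_ne_nil rest)]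
    rw [PySem.Chars.isIn_iff_infix] at ih ⊢
    rw [List.infix_cons_iff]
    constructor
    · rintro (hpre | hinf)
      · exact absurd (List.isPrefixOf_iff_prefix.mpr hpre) hnp
      · exact ih.mp hinf
    · intro h2
      exact Or.inr (ih.mpr h2)
  | case3 =>
    constructor
    · intro h
      rw [PySem.Chars.isIn_iff_infix] at h
      simp at h
    · intro h
      simp [pvSplit0] at h

theorem pvInter_snoc (ys : List (List Char)) (z : List Char) (h : ys ≠ []) :
    (['/','/'] : List Char).intercalate (ys ++ [z])
      = (['/','/'] : List Char).intercalate ys ++ '/' :: '/' :: z := by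
  induction ys with
  | nil => exact absurd rfl h
  | cons a t ih =>
    cases t with
    | nil => simp [List.intercalate]
    | cons b t' =>
      simp only [List.cons_append] at ih ⊢
      rw [pvInter_cons, pvInter_cons, ih (by simp)]
      simp

-- the string-level split of a port, as a map over pvSplit0
theorem pvSplitStr (s : String) :
    (PySem.Str.split? s "//").getD [] = (pvSplit0 s.toList).map String.ofList := by
  have hsep : ("//" : String).toList = ['/','/'] := rfl
  rw [PySem.Str.split?, PySem.Chars.split?, hsep]
  simp [pvSplitOn_eq]

-- join of pieces, back at the character level
theorem pvJoinStr (ys : List (List Char)) :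
    (PySem.Str.join "//" (ys.map String.ofList)).toList
      = (['/','/'] : List Char).intercalate ys := by
  rw [PySem.Str.join, PySem.Chars.join]
  simp [List.map_map, Function.comp_def, String.toList_ofList]

-- the recursive call of port A strictly shrinks the string (cited by decreasing_by)
theorem pvTermA (s : String) (h : PySem.Str.isIn "//" s = true) :
    (PySem.Str.join "//"
        (PySem.List.slice ((PySem.Str.split? s "//").getD []) none (some (-1)))).toList.length
      < s.toList.length := by
  rw [pvSplitStr, PySem.List.slice_to_neg_one, ← List.map_dropLast, pvJoinStr]
  have h2 : 2 ≤ (pvSplit0 s.toList).length := by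
    rw [← pvLen2_iff]
    exact h
  have hz : pvSplit0 s.toList
      = (pvSplit0 s.toList).dropLast
        ++ [(pvSplit0 s.toList).getLast (pvSplit0_ne_nil s.toList)] :=
    (List.dropLast_append_getLast (pvSplit0_ne_nil s.toList)).symm
  have hlen : (pvSplit0 s.toList).dropLast ≠ [] := by
    intro hc
    have hl := List.length_dropLast (xs := pvSplit0 s.toList)
    rw [hc] at hl
    simp at hl
    omega
  conv_rhs => rw [← pvInter_split0 s.toList, hz]
  rw [pvInter_snoc _ _ hlen]
  simp

def preprocess_model_id_py (model_id : String) (subfolder : Option String)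
    (same_as_pretrained : Bool) (use_pretrained : Bool) : String × Option String × Bool × Bool :=
  if (subfolder.getD "" != "") || !(PySem.Str.isIn "//" model_id) then
    (model_id, subfolder, same_as_pretrained, use_pretrained)
  else
    let spl := (PySem.Str.split? model_id "//").getD []
    let last := (PySem.List.pyGet? spl (-1)).getD ""
    if last == "pretrained" then
      preprocess_model_id_py (PySem.Str.join "//" (PySem.List.slice spl none (some (-1))))
        (some "") true true
    else if last == "transformer" || last == "vae" then
      (PySem.Str.join "//" (PySem.List.slice spl none (some (-1))), some last,
        same_as_pretrained, use_pretrained)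
    else
      (model_id, subfolder, same_as_pretrained, use_pretrained)
termination_by model_id.toList.length
decreasing_by
  rename_i hg _
  apply pvTermA
  simp only [Bool.not_eq_true, Bool.or_eq_true, not_or] at hg
  simpa using hg.2

-- ===== PORT B =====
-- the while loop 'while k > 1 and spl[k-1] == "pretrained": k -= 1' of Source B, structurally on k
def pvStripLoop (spl : List String) : Nat → Nat
  | 0 => 0
  | 1 => 1
  | (k + 2) =>
    if spl.getD (k + 1) "" == "pretrained" then pvStripLoop spl (k + 1) else k + 2

def preprocess_model_id_py_alt (model_id : String) (subfolder : Option String)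
    (same_as_pretrained : Bool) (use_pretrained : Bool) : String × Option String × Bool × Bool :=
  if (subfolder.getD "" != "") || !(PySem.Str.isIn "//" model_id) then
    (model_id, subfolder, same_as_pretrained, use_pretrained)
  else
    let spl := (PySem.Str.split? model_id "//").getD []
    let k := pvStripLoop spl spl.length
    if k == spl.length then
      let last := (PySem.List.pyGet? spl (-1)).getD ""
      if last == "transformer" || last == "vae" then
        (PySem.Str.join "//" (PySem.List.slice spl none (some (-1))), some last,
          same_as_pretrained, use_pretrained)
      else
        (model_id, subfolder, same_as_pretrained, use_pretrained)
    else
      let p := spl.getD (k - 1) ""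
      if decide (1 < k) && (p == "transformer" || p == "vae") then
        (PySem.Str.join "//" (spl.take (k - 1)), some p, true, true)
      else
        (PySem.Str.join "//" (spl.take k), some "", true, true)

-- ===== PRECONDITION & SPEC =====
def Spec_preprocess_model_id_py (model_id : String) (subfolder : Option String) (same_as_pretrained : Bool) (use_pretrained : Bool) (out : String × Option String × Bool × Bool) : Prop := out = preprocess_model_id_py_alt model_id subfolder same_as_pretrained use_pretrained
instance (model_id : String) (subfolder : Option String) (same_as_pretrained : Bool) (use_pretrained : Bool) (out : String × Option String × Bool × Bool) : Decidable (Spec_preprocess_model_id_py model_id subfolder same_as_pretrained use_pretrained out) := by unfold Spec_preprocess_model_id_py; infer_instance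

-- ===== CLAIM (what is proved, stated in full; the proofs are below) =====
def Claim_equal_preprocess_model_id_py : Prop := ∀ (model_id : String) (subfolder : Option String) (same_as_pretrained : Bool) (use_pretrained : Bool), Dom_preprocess_model_id_py model_id subfolder same_as_pretrained use_pretrained → Spec_preprocess_model_id_py model_id subfolder same_as_pretrained use_pretrained (preprocess_model_id_py model_id subfolder same_as_pretrained use_pretrained)

-- ===== LEMMAS AND PROOFS =====

theorem pvInterPrefix (x : List Char) (ys zs : List (List Char)) :
    (['/','/'] : List Char).intercalate (x :: ys)
      <+: (['/','/'] : List Char).intercalate (x :: (ys ++ zs)) := by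
  induction ys generalizing x with
  | nil =>
    cases zs with
    | nil => simp
    | cons z t =>
      rw [List.nil_append, pvInter_cons]
      exact ⟨'/' :: '/' :: (['/','/'] : List Char).intercalate (z :: t), by simp [List.intercalate]⟩
  | cons y t ih =>
    rw [List.cons_append, pvInter_cons, pvInter_cons]
    have h := ih y
    exact (List.prefix_append_right_inj x).mpr
      ((List.prefix_append_right_inj ['/','/']).mpr h)

-- splitting the join of the first k pieces gives those pieces back
theorem pvTake (l : List Char) : ∀ k, 1 ≤ k →
    pvSplit0 ((['/','/'] : List Char).intercalate ((pvSplit0 l).take k))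
      = (pvSplit0 l).take k := by
  induction l using pvSplit0.induct with
  | case1 rest ih =>
    intro k hk
    rw [pvSplit0]
    cases k with
    | zero => omega
    | succ j =>
      cases j with
      | zero => simp [List.intercalate, pvSplit0]
      | succ j' =>
        have hne : (pvSplit0 rest).take (j' + 1) ≠ [] := by
          intro hc
          rcases List.take_eq_nil_iff.mp hc with h | h
          · omega
          · exact pvSplit0_ne_nil rest h
        obtain ⟨x', t', ht'⟩ := List.ne_nil_iff_exists_cons.mp hne
        rw [List.take_succ_cons, ht', pvInter_cons, List.nil_append]
        rw [show pvSplit0 ('/' :: '/' :: (['/','/'] : List Char).intercalate (x' :: t'))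
              = [] :: pvSplit0 ((['/','/'] : List Char).intercalate (x' :: t')) from by
          rw [pvSplit0]]
        rw [← ht', ih (j' + 1) (by omega)]
  | case2 c rest h1 ih =>
    intro k hk
    have hnp : ¬ (['/','/'] : List Char).isPrefixOf (c :: rest) := by
      intro hpf
      obtain ⟨t, ht⟩ := List.isPrefixOf_iff_prefix.mp hpf
      have hct : c = '/' ∧ rest = '/' :: t := by simpa using ht.symm
      exact h1 t hct.1 hct.2
    obtain ⟨x, xs, hs⟩ := List.ne_nil_iff_exists_cons.mp (pvSplit0_ne_nil rest)
    rw [pvSplit0_cons c rest hnp, hs]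
    simp only [pvConsHead, List.singleton_append]
    cases k with
    | zero => omega
    | succ j =>
      rw [List.take_succ_cons, pvInter_consHead]
      have hpre : (['/','/'] : List Char).intercalate (x :: xs.take j) <+: rest := by
        have h := pvInterPrefix x (xs.take j) (xs.drop j)
        rw [List.take_append_drop] at h
        calc (['/','/'] : List Char).intercalate (x :: xs.take j)
            <+: (['/','/'] : List Char).intercalate (x :: xs) := h
          _ = (['/','/'] : List Char).intercalate (pvSplit0 rest) := by rw [hs]
          _ = rest := pvInter_split0 rest
      have hnp2 : ¬ (['/','/'] : List Char).isPrefixOf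
          (c :: (['/','/'] : List Char).intercalate (x :: xs.take j)) := by
        intro hpf
        obtain ⟨t, ht⟩ := List.isPrefixOf_iff_prefix.mp hpf
        have hct : c = '/' ∧ (['/','/'] : List Char).intercalate (x :: xs.take j) = '/' :: t := by
          simpa using ht.symm
        obtain ⟨w, hw⟩ := hpre
        rw [hct.2] at hw
        exact h1 (t ++ w) hct.1 (by rw [← hw]; simp)
      rw [pvSplit0_cons _ _ hnp2]
      have hih := ih (j + 1) (by omega)
      rw [hs, List.take_succ_cons] at hih
      rw [hih]
      simp [pvConsHead]
  | case3 =>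
    intro k hk
    cases k with
    | zero => omega
    | succ j => simp [pvSplit0, List.intercalate]

-- the strip loop only looks at indices below its counter
theorem pvStripLoop_append : ∀ (k : Nat) (ys zs : List String), k ≤ ys.length →
    pvStripLoop (ys ++ zs) k = pvStripLoop ys k := by
  intro k
  induction k using Nat.strong_induction_on with
  | _ k ih =>
    intro ys zs hk
    match k with
    | 0 => rfl
    | 1 => rfl
    | (j + 2) =>
      rw [pvStripLoop, pvStripLoop]
      rw [List.getD_append _ _ _ _ (by omega)]
      split
      · exact ih (j + 1) (by omega) ys zs (by omega)
      · rfl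

theorem pvStripLoop_le (spl : List String) : ∀ k, pvStripLoop spl k ≤ k := by
  intro k
  induction k using Nat.strong_induction_on with
  | _ k ih =>
    match k with
    | 0 => exact Nat.le_refl _
    | 1 => exact Nat.le_refl _
    | (j + 2) =>
      rw [pvStripLoop]
      split
      · exact Nat.le_trans (ih (j + 1) (by omega)) (by omega)
      · exact Nat.le_refl _

theorem pvStripLoop_pos (spl : List String) : ∀ k, 1 ≤ k → 1 ≤ pvStripLoop spl k := by
  intro k
  induction k using Nat.strong_induction_on with
  | _ k ih =>
    intro hk
    match k with
    | 1 => exact Nat.le_refl _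
    | (j + 2) =>
      rw [pvStripLoop]
      split
      · exact ih (j + 1) (by omega) (by omega)
      · omega

theorem pvStripLoop_succ2 (spl : List String) (j : Nat) :
    pvStripLoop spl (j + 2)
      = if spl.getD (j + 1) "" == "pretrained" then pvStripLoop spl (j + 1) else j + 2 := by
  rw [pvStripLoop]

theorem pvGetDConcat {α : Type} (ys : List α) (a d : α) :
    (ys ++ [a]).getD ys.length d = a := by
  simp [List.getD]

-- xs[-1] of a non-empty list, in snoc form
theorem pvGetLastNeg {α : Type} (ys : List α) (a : α) :
    PySem.List.pyGet? (ys ++ [a]) (-1) = some a := by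
  simp [PySem.List.pyGet?, PySem.List.pyIdx?]

theorem pv_main_aux : ∀ (n : Nat) (s : String) (sub : Option String) (sa su : Bool),
    s.toList.length ≤ n →
    preprocess_model_id_py s sub sa su = preprocess_model_id_py_alt s sub sa su := by
  intro n
  induction n using Nat.strong_induction_on with
  | _ n ih =>
    intro s sub sa su hlen
    rw [preprocess_model_id_py, preprocess_model_id_py_alt]
    by_cases hg : ((sub.getD "" != "") || !(PySem.Str.isIn "//" s)) = true
    · rw [if_pos hg, if_pos hg]
    · rw [if_neg hg, if_neg hg]
      have hin : PySem.Str.isIn "//" s = true := by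
        have hb : ((sub.getD "" != "") || !(PySem.Str.isIn "//" s)) = false := by
          simpa using hg
        have h2 := Bool.or_eq_false_iff.mp hb
        simpa using h2.2
      have hin' : PySem.Chars.isIn ['/','/'] s.toList = true := by
        rw [PySem.Str.isIn] at hin
        simpa using hin
      have hn2 : 2 ≤ (pvSplit0 s.toList).length := (pvLen2_iff s.toList).mp hin'
      obtain ⟨Y, z, hX⟩ : ∃ Y z, pvSplit0 s.toList = Y ++ [z] :=
        ⟨_, _, (List.dropLast_append_getLast (pvSplit0_ne_nil s.toList)).symm⟩
      have hYlen : (pvSplit0 s.toList).length = Y.length + 1 := by rw [hX]; simp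
      have hY1 : 1 ≤ Y.length := by omega
      have hYne : Y ≠ [] := by
        intro hc; rw [hc] at hY1; simp at hY1
      have hspl : (PySem.Str.split? s "//").getD []
          = (Y.map String.ofList) ++ [String.ofList z] := by
        rw [pvSplitStr, hX, List.map_append, List.map_singleton]
      have hlast : (PySem.List.pyGet? ((Y.map String.ofList) ++ [String.ofList z]) (-1)).getD ""
          = String.ofList z := by rw [pvGetLastNeg]; rfl
      have hslice : PySem.List.slice ((Y.map String.ofList) ++ [String.ofList z]) none (some (-1))
          = Y.map String.ofList := by
        rw [PySem.List.slice_to_neg_one, List.dropLast_concat]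
      have hstoList : s.toList
          = (['/','/'] : List Char).intercalate Y ++ '/' :: '/' :: z := by
        conv_lhs => rw [← pvInter_split0 s.toList, hX]
        rw [pvInter_snoc _ _ hYne]
      by_cases hzp : z = "pretrained".toList
      · -- trailing piece is "pretrained": A recurses, B strips it in the index loop
        have hzeq : (String.ofList z == "pretrained") = true := by
          rw [hzp, String.ofList_toList]
          simp
        simp only [hspl, hlast, hzeq, if_true, hslice]
        have hs'toList : (PySem.Str.join "//" (List.map String.ofList Y)).toList
            = (['/','/'] : List Char).intercalate Y := pvJoinStr Y
        have hslen : s.toList.length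
            = ((['/','/'] : List Char).intercalate Y).length + 2 + z.length := by
          rw [hstoList]; simp; omega
        have hrec := ih ((PySem.Str.join "//" (List.map String.ofList Y)).toList.length)
          (by rw [hs'toList]; omega)
          (PySem.Str.join "//" (List.map String.ofList Y)) (some "") true true (Nat.le_refl _)
        rw [hrec, preprocess_model_id_py_alt]
        have hsplit' : pvSplit0 ((PySem.Str.join "//" (List.map String.ofList Y)).toList) = Y := by
          rw [hs'toList]
          have h := pvTake s.toList Y.length hY1
          rwa [hX, List.take_left] at h
        have hspl' : (PySem.Str.split? (PySem.Str.join "//" (List.map String.ofList Y)) "//").getD []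
            = List.map String.ofList Y := by
          rw [pvSplitStr, hsplit']
        by_cases hY2 : 2 ≤ Y.length
        · -- still at least two pieces after stripping: B' takes its main branch
          have hs'in : PySem.Str.isIn "//" (PySem.Str.join "//" (List.map String.ofList Y)) = true := by
            rw [PySem.Str.isIn]
            have : PySem.Chars.isIn ['/','/'] ((PySem.Str.join "//" (List.map String.ofList Y)).toList) = true := by
              rw [hs'toList]
              apply (pvLen2_iff _).mpr
              rw [← hs'toList, hsplit']
              omega
            simpa using this
          rw [if_neg (by rw [hs'in]; simp)]
          simp only [hspl']
          obtain ⟨m, hm⟩ : ∃ m, Y.length = m + 2 := ⟨Y.length - 2, by omega⟩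
          have hYmlen : (List.map String.ofList Y).length = m + 2 := by simp [hm]
          have hgetDz : (List.map String.ofList Y ++ [String.ofList z]).getD (m + 2) ""
              = String.ofList z := by
            have h := pvGetDConcat (List.map String.ofList Y) (String.ofList z) ""
            rwa [hYmlen] at h
          have hkk : pvStripLoop (List.map String.ofList Y ++ [String.ofList z])
              (List.map String.ofList Y ++ [String.ofList z]).length
              = pvStripLoop (List.map String.ofList Y) (List.map String.ofList Y).length := by
            rw [show (List.map String.ofList Y ++ [String.ofList z]).length = (m + 1) + 2 by
              simp [hm]]
            rw [pvStripLoop_succ2, hgetDz, hzeq]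
            simp only [if_true]
            rw [pvStripLoop_append (m + 2) _ _ (by omega), hYmlen]
          rw [hkk]
          have hkle := pvStripLoop_le (List.map String.ofList Y) (List.map String.ofList Y).length
          have hkpos := pvStripLoop_pos (List.map String.ofList Y) (List.map String.ofList Y).length
            (by omega)
          set k' := pvStripLoop (List.map String.ofList Y) (List.map String.ofList Y).length with hk'
          have hkne : (k' == (List.map String.ofList Y ++ [String.ofList z]).length) = false := by
            apply beq_eq_false_iff_ne.mpr
            simp only [List.length_append, List.length_map, List.length_singleton]
            omega
          rw [hkne]
          simp only [Bool.false_eq_true, if_false]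
          by_cases hke : k' = (List.map String.ofList Y).length
          · -- the strip loop stopped at the old last piece
            obtain ⟨Y2, w, hY⟩ : ∃ Y2 w, Y = Y2 ++ [w] :=
              ⟨_, _, (List.dropLast_append_getLast hYne).symm⟩
            have hY2len : Y.length = Y2.length + 1 := by rw [hY]; simp
            have hYmap : List.map String.ofList Y
                = List.map String.ofList Y2 ++ [String.ofList w] := by
              rw [hY, List.map_append, List.map_singleton]
            rw [hke]
            simp only [beq_self_eq_true, if_true]
            have hlast' : (PySem.List.pyGet? (List.map String.ofList Y) (-1)).getD ""
                = String.ofList w := by rw [hYmap, pvGetLastNeg]; rfl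
            have hslice' : PySem.List.slice (List.map String.ofList Y) none (some (-1))
                = List.map String.ofList Y2 := by
              rw [hYmap, PySem.List.slice_to_neg_one, List.dropLast_concat]
            have hlen1 : (List.map String.ofList Y).length - 1
                = (List.map String.ofList Y2).length := by
              rw [hY]; simp
            have hp : (List.map String.ofList Y ++ [String.ofList z]).getD
                ((List.map String.ofList Y).length - 1) "" = String.ofList w := by
              rw [List.getD_append _ _ _ _ (by simp [hm])]
              rw [hlen1, hYmap, pvGetDConcat]
            have htake1 : List.take ((List.map String.ofList Y).length - 1)
                (List.map String.ofList Y ++ [String.ofList z]) = List.map String.ofList Y2 := by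
              rw [List.take_append_of_le_length (by omega)]
              rw [hlen1, hYmap, List.take_left]
            have htake2 : List.take (List.map String.ofList Y).length
                (List.map String.ofList Y ++ [String.ofList z]) = List.map String.ofList Y := by
              rw [List.take_append_of_le_length (le_refl _), List.take_length]
            rw [hlast', hslice', hp, htake1, htake2]
            have hdec : decide (1 < (List.map String.ofList Y).length) = true := by
              simp [hm]
            rw [hdec]
            simp
          · -- the strip loop stopped strictly inside Y
            have hklt : k' < (List.map String.ofList Y).length := by
              rcases Nat.lt_or_ge k' (List.map String.ofList Y).length with h | h
              · exact h
              · exact absurd (Nat.le_antisymm hkle h) hke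
            have hkne2 : (k' == (List.map String.ofList Y).length) = false :=
              beq_eq_false_iff_ne.mpr hke
            rw [hkne2]
            simp only [Bool.false_eq_true, if_false]
            have hpeq : (List.map String.ofList Y ++ [String.ofList z]).getD (k' - 1) ""
                = (List.map String.ofList Y).getD (k' - 1) "" :=
              List.getD_append _ _ _ _ (by omega)
            have htake1 : List.take (k' - 1) (List.map String.ofList Y ++ [String.ofList z])
                = List.take (k' - 1) (List.map String.ofList Y) :=
              List.take_append_of_le_length (by omega)
            have htake2 : List.take k' (List.map String.ofList Y ++ [String.ofList z])
                = List.take k' (List.map String.ofList Y) :=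
              List.take_append_of_le_length (by omega)
            rw [hpeq, htake1, htake2]
        · -- only one piece remains: B' returns it unchanged
          have hY1e : Y.length = 1 := by omega
          have hs'in : PySem.Str.isIn "//" (PySem.Str.join "//" (List.map String.ofList Y)) = false := by
            rw [PySem.Str.isIn]
            have hnot : ¬ PySem.Chars.isIn ['/','/']
                ((PySem.Str.join "//" (List.map String.ofList Y)).toList) = true := by
              intro hc
              have h2 := (pvLen2_iff _).mp hc
              rw [hsplit'] at h2
              omega
            simpa using Bool.not_eq_true _ |>.mp hnot
          rw [if_pos (by rw [hs'in]; simp)]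
          -- B on s: the loop strips down to k = 1 and rejoins the single piece
          have hgetD1 : (List.map String.ofList Y ++ [String.ofList z]).getD 1 ""
              = String.ofList z := by
            have h := pvGetDConcat (List.map String.ofList Y) (String.ofList z) ""
            rwa [List.length_map, hY1e] at h
          have hk1 : pvStripLoop (List.map String.ofList Y ++ [String.ofList z])
              (List.map String.ofList Y ++ [String.ofList z]).length = 1 := by
            rw [show (List.map String.ofList Y ++ [String.ofList z]).length = 0 + 2 by
              simp [hY1e]]
            rw [pvStripLoop_succ2]
            simp only [Nat.zero_add, hgetD1, hzeq, if_true]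
            rfl
          rw [hk1]
          have hne1 : ((1 : Nat) == (List.map String.ofList Y ++ [String.ofList z]).length) = false := by
            apply beq_eq_false_iff_ne.mpr
            simp [hY1e]
          rw [hne1]
          have htake : List.take 1 (List.map String.ofList Y ++ [String.ofList z])
              = List.map String.ofList Y := by
            rw [List.take_append_of_le_length (by simp [hY1e])]
            rw [show (1 : Nat) = (List.map String.ofList Y).length by simp [hY1e], List.take_length]
          rw [htake]
          simp
      · have hzeq : (String.ofList z == "pretrained") = false := by
          apply beq_eq_false_iff_ne.mpr
          intro hc
          exact hzp (by rw [← hc, String.toList_ofList])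
        simp only [hspl, hlast, hzeq, hslice]
        obtain ⟨m, hm⟩ : ∃ m, Y.length = m + 1 := ⟨Y.length - 1, by omega⟩
        have hlen2 : (List.map String.ofList Y ++ [String.ofList z]).length = m + 2 := by
          simp [hm]
        have hgetD : (List.map String.ofList Y ++ [String.ofList z]).getD (m + 1) ""
            = String.ofList z := by
          have h := pvGetDConcat (List.map String.ofList Y) (String.ofList z) ""
          rwa [List.length_map, hm] at h
        have hk : pvStripLoop (List.map String.ofList Y ++ [String.ofList z])
            (List.map String.ofList Y ++ [String.ofList z]).length
            = (List.map String.ofList Y ++ [String.ofList z]).length := by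
          rw [hlen2, pvStripLoop_succ2, hgetD, hzeq]
          simp
        rw [hk]
        simp

theorem pv_main (model_id : String) (subfolder : Option String)
    (same_as_pretrained : Bool) (use_pretrained : Bool) :
    preprocess_model_id_py model_id subfolder same_as_pretrained use_pretrained
      = preprocess_model_id_py_alt model_id subfolder same_as_pretrained use_pretrained := by
  exact pv_main_aux model_id.toList.length model_id subfolder same_as_pretrained
    use_pretrained (Nat.le_refl _)

-- ===== VERDICT (by name: the statement is the Claim_ definition above) =====
theorem preprocess_model_id_py_spec : Claim_equal_preprocess_model_id_py := by
  intro model_id subfolder same_as_pretrained use_pretrained _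
  unfold Spec_preprocess_model_id_py
  exact pv_main model_id subfolder same_as_pretrained use_pretrained
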